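-- pv_equiv track=rewrite | github.com/alihaydarkurban/CSE321-Introduction-to-Algorithm-Design | HW4/151044058_hw4.py | findLeftMostMinumumElementAndIndexRecursive
-- ===== SOURCE A (Python) =====
-- def findLeftMostMinumumElementAndIndexRecursive(array, start, end):
--     if (start == end):
--         return array[start], start
--
--     middleIndex = int((start + end) / 2)
--
--     minimumNumber1, leftMostIndex1 = findLeftMostMinumumElementAndIndexRecursive(array, start, middleIndex)
--     minimumNumber2, leftMostIndex2 = findLeftMostMinumumElementAndIndexRecursive(array, middleIndex + 1, end)
--
--     if (minimumNumber1 <= minimumNumber2):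
--         return minimumNumber1, leftMostIndex1
--     elif (minimumNumber1 > minimumNumber2):
--         return minimumNumber2, leftMostIndex2
-- ===== SOURCE B (Python) =====
-- def findLeftMostMinumumElementAndIndexRecursive(array, start, end):
--     bestIndex = min(range(start, end + 1), key=lambda i: array[i])
--     return array[bestIndex], bestIndex
-- ===== Notes on version B (the rewrite author's own statement) =====
-- stated objective: idiomatic
-- what changed: Replaces the divide-and-conquer recursion with the idiomatic built-in min(range(start, end+1), key=lambda i: array[i]), whose first-extremal rule keeps the leftmost minimum index exactly as A's '<=' left preference does.
import Mathlib
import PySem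

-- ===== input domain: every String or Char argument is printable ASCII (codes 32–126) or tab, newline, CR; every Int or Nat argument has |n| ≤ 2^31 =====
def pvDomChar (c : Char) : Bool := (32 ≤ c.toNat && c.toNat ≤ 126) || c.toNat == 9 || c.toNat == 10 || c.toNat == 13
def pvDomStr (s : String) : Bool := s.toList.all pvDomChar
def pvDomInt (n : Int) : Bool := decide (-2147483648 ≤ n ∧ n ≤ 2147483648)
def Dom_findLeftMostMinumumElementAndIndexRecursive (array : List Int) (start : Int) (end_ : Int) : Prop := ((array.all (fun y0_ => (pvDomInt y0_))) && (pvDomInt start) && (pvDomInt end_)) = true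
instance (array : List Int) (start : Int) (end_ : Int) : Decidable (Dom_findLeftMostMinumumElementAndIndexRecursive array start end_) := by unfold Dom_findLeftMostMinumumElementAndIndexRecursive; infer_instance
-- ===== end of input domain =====

-- B replaces A's divide-and-conquer recursion by the idiomatic min(range(start, end+1), key=...),
-- which keeps the leftmost minimising index; same return value on every input admitted by Pre_.

-- ===== PORT A =====
-- Literal transliteration of A's recursion, driven by a fuel counter ((end_-start).toNat+1
-- always suffices under Pre_); fuel 0 is unreachable under Pre_.
-- int((start+end)/2) is truncation toward zero: exact as PySem.Int.truncdiv since |start+end| ≤ 2^32 < 2^53.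
-- array[start] is ported as pyGetD (in range under Pre_; out of range Python raises IndexError, excluded by Pre_).
-- A's 'elif minimumNumber1 > minimumNumber2' is the exhaustive complement of '<=', ported as 'else'.
def pvGoA (array : List Int) : Nat → Int → Int → Int × Int
  | 0, _, _ => (0, 0)
  | fuel + 1, start, end_ =>
    if start = end_ then
      (PySem.List.pyGetD array start 0, start)
    else
      let middleIndex := PySem.Int.truncdiv (start + end_) 2
      let r1 := pvGoA array fuel start middleIndex
      let r2 := pvGoA array fuel (middleIndex + 1) end_
      if r1.1 ≤ r2.1 then r1 else r2

def findLeftMostMinumumElementAndIndexRecursive (array : List Int) (start : Int) (end_ : Int) : Int × Int :=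
  pvGoA array ((end_ - start).toNat + 1) start end_

-- ===== PORT B =====
-- min(range(start, end+1), key=lambda i: array[i]) is PySem.List.min? (first minimiser, i.e. the
-- leftmost); none is Python's ValueError on an empty range, excluded by Pre_.
def findLeftMostMinumumElementAndIndexRecursive_alt (array : List Int) (start : Int) (end_ : Int) : Int × Int :=
  match PySem.List.min? (PySem.List.pyRange start (end_ + 1) 1) (fun i => PySem.List.pyGetD array i 0) with
  | none => (0, 0)
  | some bestIndex => (PySem.List.pyGetD array bestIndex 0, bestIndex)

-- ===== PRECONDITION & SPEC =====
-- Exactly where Python A returns: canonical in-range bounds 0 ≤ start ≤ end < len, plus the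
-- degenerate start == end with a negative in-range index (Python wraparound); everywhere else A
-- recurses forever (RecursionError) or raises IndexError.
def Pre_findLeftMostMinumumElementAndIndexRecursive (array : List Int) (start : Int) (end_ : Int) : Prop :=
  start ≤ end_ ∧ end_ < (array.length : Int) ∧
    (0 ≤ start ∨ (start = end_ ∧ -(array.length : Int) ≤ start))
instance (array : List Int) (start : Int) (end_ : Int) : Decidable (Pre_findLeftMostMinumumElementAndIndexRecursive array start end_) := by unfold Pre_findLeftMostMinumumElementAndIndexRecursive; infer_instance

def pvWitness_findLeftMostMinumumElementAndIndexRecursive : List Int × Int × Int := ([3, 1, 1, 2], 0, 3)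

def Spec_findLeftMostMinumumElementAndIndexRecursive (array : List Int) (start : Int) (end_ : Int) (out : Int × Int) : Prop := out = findLeftMostMinumumElementAndIndexRecursive_alt array start end_
instance (array : List Int) (start : Int) (end_ : Int) (out : Int × Int) : Decidable (Spec_findLeftMostMinumumElementAndIndexRecursive array start end_ out) := by unfold Spec_findLeftMostMinumumElementAndIndexRecursive; infer_instance

-- ===== CLAIM (what is proved, stated in full; the proofs are below) =====
def Claim_equal_findLeftMostMinumumElementAndIndexRecursive : Prop := ∀ (array : List Int) (start : Int) (end_ : Int), Dom_findLeftMostMinumumElementAndIndexRecursive array start end_ → Pre_findLeftMostMinumumElementAndIndexRecursive array start end_ → Spec_findLeftMostMinumumElementAndIndexRecursive array start end_ (findLeftMostMinumumElementAndIndexRecursive array start end_)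

-- ===== LEMMAS AND PROOFS =====

-- One step of min(…, key=…): keep the current index unless a strictly smaller value appears.
def pvStep (array : List Int) (b i : Int) : Int :=
  if PySem.List.pyGetD array i 0 < PySem.List.pyGetD array b 0 then i else b

-- A's merge of two sub-results, on indices: take the left one on ties.
def pvCombine (array : List Int) (x y : Int) : Int :=
  if PySem.List.pyGetD array x 0 ≤ PySem.List.pyGetD array y 0 then x else y

-- the leftmost minimising index of array over [s, e], as the fold B performs after its head step
def pvCore (array : List Int) (s e : Int) : Int :=
  (PySem.List.pyRange (s + 1) (e + 1) 1).foldl (pvStep array) s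

lemma pvStep_eq_combine (array : List Int) (b i : Int) :
    pvStep array b i = pvCombine array b i := by
  simp only [pvStep, pvCombine]
  split_ifs <;> first | rfl | omega

lemma pvCombine_assoc (array : List Int) (x y z : Int) :
    pvCombine array (pvCombine array x y) z = pvCombine array x (pvCombine array y z) := by
  simp only [pvCombine]
  split_ifs <;> first | rfl | omega

-- The fold over range(s, e+1) started from any accumulator combines it with pvCore on [s, e].
lemma pv_foldl_eq (array : List Int) :
    ∀ (n : Nat) (s e acc : Int), s ≤ e → (e - s).toNat = n →
      (PySem.List.pyRange s (e + 1) 1).foldl (pvStep array) acc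
        = pvCombine array acc (pvCore array s e) := by
  intro n
  induction n with
  | zero =>
    intro s e acc hse hn
    have hes : e = s := by omega
    subst hes
    rw [PySem.List.pyRange_one_singleton]
    simp only [List.foldl_cons, List.foldl_nil]
    rw [pvCore, PySem.List.pyRange_one_eq_nil (by omega), List.foldl_nil, pvStep_eq_combine]
  | succ n ih =>
    intro s e acc hse hn
    rw [PySem.List.pyRange_one_cons (by omega), List.foldl_cons]
    rw [ih (s + 1) e (pvStep array acc s) (by omega) (by omega)]
    have hcore : pvCore array s e = pvCombine array s (pvCore array (s + 1) e) := by
      rw [pvCore, ih (s + 1) e s (by omega) (by omega)]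
    rw [hcore, pvStep_eq_combine, pvCombine_assoc]

-- pvCore on [s, e] splits at any m with s ≤ m < e the way A's recursion merges.
lemma pv_core_split (array : List Int) (s m e : Int) (h1 : s ≤ m) (h2 : m < e) :
    pvCore array s e = pvCombine array (pvCore array s m) (pvCore array (m + 1) e) := by
  conv_lhs => rw [pvCore]
  rw [PySem.List.pyRange_one_append (s + 1) (m + 1) (e + 1) (by omega) (by omega),
    List.foldl_append]
  rw [show (PySem.List.pyRange (s + 1) (m + 1) 1).foldl (pvStep array) s = pvCore array s m from rfl]
  exact pv_foldl_eq array ((e - (m + 1)).toNat) (m + 1) e _ (by omega) rfl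

lemma pv_mid (s e : Int) (h0 : 0 ≤ s) (hse : s ≤ e) :
    PySem.Int.truncdiv (s + e) 2 = (s + e) / 2 := by
  simp [PySem.Int.truncdiv]
  rw [Int.tdiv_eq_ediv_of_nonneg (by omega)]

-- A's recursion computes (array[pvCore s e], pvCore s e).
lemma pvGoA_eq_core (array : List Int) :
    ∀ (fuel : Nat) (s e : Int), 0 ≤ s → s ≤ e → e < (array.length : Int) →
      (e - s).toNat < fuel →
      pvGoA array fuel s e = (PySem.List.pyGetD array (pvCore array s e) 0, pvCore array s e) := by
  intro fuel
  induction fuel with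
  | zero => intro s e _ _ _ hf; omega
  | succ fuel ih =>
    intro s e h0 hse hlen hf
    rw [pvGoA]
    by_cases hse' : s = e
    · subst hse'
      simp only [if_true]
      rw [pvCore, PySem.List.pyRange_one_eq_nil (by omega), List.foldl_nil]
    · simp only [if_neg hse']
      have hmid : PySem.Int.truncdiv (s + e) 2 = (s + e) / 2 := pv_mid s e h0 hse
      have hb1 : s ≤ (s + e) / 2 := by omega
      have hb2 : (s + e) / 2 < e := by omega
      rw [hmid]
      rw [ih s ((s + e) / 2) h0 hb1 (by omega) (by omega)]
      rw [ih ((s + e) / 2 + 1) e (by omega) (by omega) hlen (by omega)]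
      rw [pv_core_split array s ((s + e) / 2) e hb1 hb2]
      simp only [pvCombine]
      split_ifs <;> rfl

-- min(…, key=lambda i: array[i]) on a non-empty list folds pvStep from its head.
lemma pv_min?_eq (array : List Int) :
    ∀ (l : List Int) (b : Int),
      PySem.List.min? (b :: l) (fun i => PySem.List.pyGetD array i 0)
        = some (l.foldl (pvStep array) b) := by
  intro l
  induction l with
  | nil => intro b; rfl
  | cons x l ih =>
    intro b
    have h1 : PySem.List.min? (b :: x :: l) (fun i => PySem.List.pyGetD array i 0)
        = PySem.List.min? (pvStep array b x :: l) (fun i => PySem.List.pyGetD array i 0) := by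
      simp only [PySem.List.min?, List.foldl_cons, pvStep]
      split_ifs <;> rfl
    rw [h1, ih, List.foldl_cons]

-- B's result on a non-empty range is (array[pvCore s e], pvCore s e).
lemma pv_alt_eq_core (array : List Int) (s e : Int) (hse : s ≤ e) :
    findLeftMostMinumumElementAndIndexRecursive_alt array s e
      = (PySem.List.pyGetD array (pvCore array s e) 0, pvCore array s e) := by
  rw [findLeftMostMinumumElementAndIndexRecursive_alt, PySem.List.pyRange_one_cons (by omega),
    pv_min?_eq array (PySem.List.pyRange (s + 1) (e + 1) 1) s]
  rfl

-- ===== VERDICT (by name: the statement is the Claim_ definition above) =====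
theorem findLeftMostMinumumElementAndIndexRecursive_spec : Claim_equal_findLeftMostMinumumElementAndIndexRecursive := by
  intro array start end_ _ hpre
  obtain ⟨hse, hlen, h0 | ⟨heq, _⟩⟩ := hpre
  · unfold Spec_findLeftMostMinumumElementAndIndexRecursive findLeftMostMinumumElementAndIndexRecursive
    rw [pv_alt_eq_core array start end_ hse]
    exact pvGoA_eq_core array _ start end_ h0 hse hlen (by omega)
  · subst heq
    unfold Spec_findLeftMostMinumumElementAndIndexRecursive findLeftMostMinumumElementAndIndexRecursive
    rw [pv_alt_eq_core array start start le_rfl]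
    rw [pvCore, PySem.List.pyRange_one_eq_nil (by omega), List.foldl_nil]
    simp [pvGoA]
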